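-- pv_equiv track=rewrite | github.com/espaciomore/my-code-kata | BioInformatics/IncrementPattern.py | IncrementPattern
-- ===== SOURCE A (Python) =====
-- def IncrementPattern(pattern):
--
-- 	new_pattern = ''
--
-- 	value_map = {
-- 	  'A': 0, 'C': 1, 'G': 2, 'T': 3,
-- 	  0: 'A', 1: 'C', 2: 'G', 3: 'T'
-- 	}
--
-- 	carry = True
--
-- 	for i in range(0, len(pattern)):
--
-- 		next_value = value_map.get(pattern[len(pattern) - 1 - i])
--
-- 		next_value += 1 if carry else 0
--
-- 		if next_value > 3:
--
-- 			next_value = 0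
--
-- 			carry = True
--
-- 		else:
--
-- 			carry = False
--
-- 		new_pattern = value_map.get(next_value) + new_pattern
--
--
-- 	return new_pattern
-- ===== SOURCE B (Python) =====
-- def IncrementPattern(pattern):
-- 	head = pattern.rstrip('T')
-- 	tail = 'A' * (len(pattern) - len(head))
-- 	if head:
-- 		return head[:-1] + 'ACGT'['ACGT'.index(head[-1]) + 1] + tail
-- 	return tail
-- ===== Notes on version B (the rewrite author's own statement) =====
-- stated objective: faster
-- what changed: B replaces A's right-to-left carry loop with quadratic string prepending by a direct O(n) computation: strip trailing 'T's, bump the last remaining character one step in 'ACGT', and pad with 'A's.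
import Mathlib
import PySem

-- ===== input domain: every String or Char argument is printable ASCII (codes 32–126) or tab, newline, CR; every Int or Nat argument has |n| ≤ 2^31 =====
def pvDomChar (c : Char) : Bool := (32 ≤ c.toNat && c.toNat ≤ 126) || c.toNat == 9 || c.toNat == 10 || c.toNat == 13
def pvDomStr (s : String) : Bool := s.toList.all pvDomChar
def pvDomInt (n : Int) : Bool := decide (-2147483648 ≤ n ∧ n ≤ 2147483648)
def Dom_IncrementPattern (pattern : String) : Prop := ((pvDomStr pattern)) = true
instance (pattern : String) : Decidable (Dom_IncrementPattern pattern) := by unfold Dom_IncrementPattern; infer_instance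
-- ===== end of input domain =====

-- B strips trailing 'T's, bumps the last remaining char in 'ACGT' and pads with 'A's, an
-- O(n) re-implementation of A's carry loop with repeated string prepending; equal on Pre_.


-- ===== PORT A =====
-- value_map.get(c): on chars outside A/C/G/T Python returns None and 'next_value += 1'
-- raises TypeError; those inputs are excluded by Pre_, the port defaults to 0 there.
def pvVal (c : Char) : Nat :=
  if c = 'A' then 0 else if c = 'C' then 1 else if c = 'G' then 2 else if c = 'T' then 3 else 0

-- value_map.get(n) for n = 0..3 (the only values A looks up)
def pvChr (n : Nat) : Char :=
  if n = 0 then 'A' else if n = 1 then 'C' else if n = 2 then 'G' else 'T'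

-- one iteration of A's loop body on the state (new_pattern as a char list, carry)
def pvStepA (st : List Char × Bool) (c : Char) : List Char × Bool :=
  let v := pvVal c + (if st.2 then 1 else 0)
  let vc := if v > 3 then (0, true) else (v, false)
  (pvChr vc.1 :: st.1, vc.2)

def IncrementPattern (pattern : String) : String :=
  let l := pattern.toList
  let n := l.length
  let res := (List.range n).foldl (fun st i => pvStepA st (l.getD (n - 1 - i) 'A')) ([], true)
  String.mk res.1

-- ===== PORT B =====
-- pattern.rstrip('T')
def pvRstripT (l : List Char) : List Char := (l.reverse.dropWhile (· = 'T')).reverse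

-- 'ACGT'['ACGT'.index(c) + 1]; B only applies it to the last char of head, which is
-- 'A'/'C'/'G' on Pre_ (on other chars Python raises there, outside Pre_).
def pvBump (c : Char) : Char := if c = 'A' then 'C' else if c = 'C' then 'G' else 'T'

def IncrementPattern_alt (pattern : String) : String :=
  let l := pattern.toList
  let head := pvRstripT l
  let tail := List.replicate (l.length - head.length) 'A'
  if head = [] then String.mk tail
  else String.mk (head.dropLast ++ pvBump (head.getLastD 'A') :: tail)

-- ===== PRECONDITION & SPEC =====
-- Pre_ excludes exactly the patterns containing a character outside A/C/G/T, on which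
-- the Python A raises TypeError (None + int) and returns nothing.
def Pre_IncrementPattern (pattern : String) : Prop :=
  (pattern.toList.all (fun c => c == 'A' || c == 'C' || c == 'G' || c == 'T')) = true
instance (pattern : String) : Decidable (Pre_IncrementPattern pattern) := by
  unfold Pre_IncrementPattern; infer_instance

def pvWitness_IncrementPattern : String := "ACGT"

def Spec_IncrementPattern (pattern : String) (out : String) : Prop := out = IncrementPattern_alt pattern
instance (pattern : String) (out : String) : Decidable (Spec_IncrementPattern pattern out) := by unfold Spec_IncrementPattern; infer_instance

-- ===== CLAIM (what is proved, stated in full; the proofs are below) =====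
def Claim_equal_IncrementPattern : Prop := ∀ (pattern : String), Dom_IncrementPattern pattern → Pre_IncrementPattern pattern → Spec_IncrementPattern pattern (IncrementPattern pattern)

-- ===== LEMMAS AND PROOFS =====

theorem pv_range_map_reverse (l : List Char) :
    (List.range l.length).map (fun i => l.getD (l.length - 1 - i) 'A') = l.reverse := by
  apply List.ext_getElem
  · simp
  · intro i h1 h2
    simp only [List.getElem_map, List.getElem_range, List.getElem_reverse]
    simp only [List.length_map, List.length_range] at h1
    rw [List.getD_eq_getElem _ _ (by omega)]

theorem pv_copy (r : List Char) (h : ∀ c ∈ r, c = 'A' ∨ c = 'C' ∨ c = 'G' ∨ c = 'T')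
    (acc : List Char) :
    r.foldl pvStepA (acc, false) = (r.reverse ++ acc, false) := by
  induction r generalizing acc with
  | nil => simp
  | cons c r' ih =>
    have hc := h c (by simp)
    have hstep : pvStepA (acc, false) c = (c :: acc, false) := by
      rcases hc with h | h | h | h <;> subst h <;> rfl
    rw [List.foldl_cons, hstep, ih (fun x hx => h x (List.mem_cons_of_mem _ hx)) (c :: acc)]
    simp

theorem pv_carry (r : List Char)
    (h : ∀ c ∈ r, c = 'A' ∨ c = 'C' ∨ c = 'G' ∨ c = 'T') (acc : List Char) :
    (r.foldl pvStepA (acc, true)).1 =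
      (match r.dropWhile (· = 'T') with
       | [] => List.replicate r.length 'A' ++ acc
       | c :: rest =>
           rest.reverse ++ pvBump c :: List.replicate (r.length - rest.length - 1) 'A' ++ acc) := by
  induction r generalizing acc with
  | nil => simp
  | cons c r' ih =>
    have hc := h c (by simp)
    by_cases hT : c = 'T'
    · subst hT
      have hstep : pvStepA (acc, true) 'T' = ('A' :: acc, true) := by rfl
      have hdw : ('T' :: r').dropWhile (· = 'T') = r'.dropWhile (· = 'T') := by
        simp [List.dropWhile]
      rw [List.foldl_cons, hstep, ih (fun x hx => h x (by simp [hx])) ('A' :: acc), hdw]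
      cases hsplit : r'.dropWhile (· = 'T') with
      | nil => simp [List.replicate_succ']
      | cons c' rest =>
        have hlen : rest.length + 1 ≤ r'.length := by
          have := (List.dropWhile_sublist (l := r') (p := (· = 'T'))).length_le
          rw [hsplit] at this; simpa using this
        have : r'.length + 1 - rest.length - 1 = (r'.length - rest.length - 1) + 1 := by omega
        simp [this, List.replicate_succ', List.append_assoc]
    · have hbump : pvStepA (acc, true) c = (pvBump c :: acc, false) := by
        rcases hc with h | h | h | h <;> subst h <;> first | rfl | exact absurd rfl hT
      have hdw : (c :: r').dropWhile (· = 'T') = c :: r' := by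
        simp [List.dropWhile, hT]
      rw [List.foldl_cons, hbump, pv_copy r' (fun x hx => h x (by simp [hx])) (pvBump c :: acc),
        hdw]
      simp

theorem pv_final (pattern : String)
    (hpre : (pattern.toList.all (fun c => c == 'A' || c == 'C' || c == 'G' || c == 'T')) = true) :
    IncrementPattern pattern = IncrementPattern_alt pattern := by
  unfold IncrementPattern IncrementPattern_alt pvRstripT
  set l := pattern.toList with hl
  have hvalid : ∀ c ∈ l.reverse, c = 'A' ∨ c = 'C' ∨ c = 'G' ∨ c = 'T' := by
    intro c hcm
    rw [List.mem_reverse] at hcm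
    have := List.all_eq_true.mp hpre c hcm
    simp only [Bool.or_eq_true, beq_iff_eq] at this
    tauto
  have hfold : (List.range l.length).foldl
      (fun st i => pvStepA st (l.getD (l.length - 1 - i) 'A')) ([], true)
      = l.reverse.foldl pvStepA ([], true) := by
    rw [← pv_range_map_reverse l, List.foldl_map]
  simp only [hfold]
  rw [pv_carry l.reverse hvalid []]
  cases hsplit : l.reverse.dropWhile (· = 'T') with
  | nil => simp
  | cons c rest =>
    have hlen : rest.length + 1 ≤ l.length := by
      have := (List.dropWhile_sublist (l := l.reverse) (p := (· = 'T'))).length_le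
      rw [hsplit] at this; simpa using this
    simp
    rw [show l.length - rest.length - 1 = l.length - (rest.length + 1) from by omega]


-- ===== VERDICT (by name: the statement is the Claim_ definition above) =====
theorem IncrementPattern_spec : Claim_equal_IncrementPattern := by
  intro pattern _ hpre
  unfold Pre_IncrementPattern at hpre
  unfold Spec_IncrementPattern
  exact pv_final pattern hpre
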